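-- pv_equiv track=rewrite | github.com/debeski/DNgine | fp_plugins/web_dev/plugins/code_factory.py | _indent_columns
-- ===== SOURCE A (Python) =====
-- def _indent_columns(leading: str, width: int) -> int:
--     columns = 0
--     for char in leading:
--         if char == "\t":
--             columns += width
--         else:
--             columns += 1
--     return columns
-- ===== SOURCE B (Python) =====
-- def _indent_columns(leading: str, width: int) -> int:
--     tabs = leading.count("\t")
--     return tabs * width + (len(leading) - tabs)
-- ===== Notes on version B (the rewrite author's own statement) =====
-- stated objective: simpler
-- what changed: Replaces the character-by-character accumulation loop with a closed arithmetic form from two whole-string counts: tabs*width + (len - tabs), pushing the scan into C-level str.count/len.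
import Mathlib
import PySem

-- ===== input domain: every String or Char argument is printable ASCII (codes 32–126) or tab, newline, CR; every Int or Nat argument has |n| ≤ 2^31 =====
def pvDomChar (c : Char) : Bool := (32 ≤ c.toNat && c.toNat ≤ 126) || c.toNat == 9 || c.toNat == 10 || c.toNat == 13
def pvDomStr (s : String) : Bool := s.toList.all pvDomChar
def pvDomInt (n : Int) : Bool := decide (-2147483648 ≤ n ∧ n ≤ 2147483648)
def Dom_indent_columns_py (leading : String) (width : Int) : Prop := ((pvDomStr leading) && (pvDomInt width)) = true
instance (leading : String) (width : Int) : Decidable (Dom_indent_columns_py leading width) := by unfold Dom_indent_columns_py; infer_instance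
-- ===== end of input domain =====

-- B replaces A's per-character accumulation loop by the closed arithmetic form tabs*width + (len - tabs).

-- ===== PORT A =====
-- columns = 0; for char in leading: columns += width if char == "\t" else 1; return columns
def indent_columns_py (leading : String) (width : Int) : Int :=
  leading.toList.foldl (fun columns char => if char == '\t' then columns + width else columns + 1) 0

-- ===== PORT B =====
-- tabs = leading.count("\t"); return tabs * width + (len(leading) - tabs)
def indent_columns_py_alt (leading : String) (width : Int) : Int :=
  let tabs : Nat := PySem.Str.count leading "\t"
  (tabs : Int) * width + (PySem.Str.len leading - (tabs : Int))

-- ===== PRECONDITION & SPEC =====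
def Spec_indent_columns_py (leading : String) (width : Int) (out : Int) : Prop := out = indent_columns_py_alt leading width
instance (leading : String) (width : Int) (out : Int) : Decidable (Spec_indent_columns_py leading width out) := by unfold Spec_indent_columns_py; infer_instance

-- ===== CLAIM (what is proved, stated in full; the proofs are below) =====
def Claim_equal_indent_columns_py : Prop := ∀ (leading : String) (width : Int), Dom_indent_columns_py leading width → Spec_indent_columns_py leading width (indent_columns_py leading width)

-- ===== LEMMAS AND PROOFS =====

-- For a one-character pattern, Python's str.count is the per-character count.
theorem count_go_single (c : Char) : ∀ (l : List Char) (fuel acc : Nat), l.length ≤ fuel →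
    PySem.Chars.count.go [c] fuel l acc = acc + l.count c := by
  intro l
  induction l with
  | nil => intro fuel acc _; cases fuel <;> simp [PySem.Chars.count.go]
  | cons h t ih =>
    intro fuel acc hle
    cases fuel with
    | zero => simp at hle
    | succ n =>
      simp only [PySem.Chars.count.go, List.isPrefixOf]
      by_cases hc : h = c
      · subst hc
        simp only [BEq.rfl, Bool.true_and, List.isPrefixOf, if_pos]
        rw [show ([h].length) = 1 from rfl, List.drop_one, List.tail_cons,
            ih n (acc + 1) (by simpa using Nat.le_of_succ_le_succ hle)]
        simp [List.count_cons]
        omega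
      · have : (c == h) = false := by simp [beq_iff_eq]; exact fun e => hc e.symm
        simp only [this, Bool.false_and, if_neg Bool.false_ne_true,
            ih n acc (by simpa using Nat.le_of_succ_le_succ hle)]
        simp [List.count_cons, hc]

theorem chars_count_single (l : List Char) (c : Char) :
    PySem.Chars.count l [c] = l.count c := by
  simp [PySem.Chars.count]
  simpa using count_go_single c l l.length 0 (le_refl _)

-- A's loop in closed form.
theorem foldl_indent (width : Int) : ∀ (l : List Char) (acc : Int),
    l.foldl (fun columns char => if char == '\t' then columns + width else columns + 1) acc
      = acc + (l.count '\t' : Int) * width + ((l.length : Int) - (l.count '\t' : Int)) := by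
  intro l
  induction l with
  | nil => intro acc; simp
  | cons h t ih =>
    intro acc
    by_cases hc : h = '\t'
    · subst hc
      simp only [List.foldl_cons, BEq.rfl, if_pos, ih]
      simp [List.count_cons]
      push_cast
      ring
    · have hb : (h == '\t') = false := by simp [hc]
      simp only [List.foldl_cons, hb, if_neg Bool.false_ne_true, ih]
      simp [List.count_cons, hc]
      push_cast
      ring

-- ===== VERDICT (by name: the statement is the Claim_ definition above) =====
theorem indent_columns_py_spec : Claim_equal_indent_columns_py := by
  intro leading width _
  unfold Spec_indent_columns_py indent_columns_py indent_columns_py_alt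
  rw [foldl_indent]
  simp [PySem.Str.count, chars_count_single, PySem.Str.len, PySem.Chars.len]
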